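-- pv_equiv track=rewrite | github.com/Lksnight42/TES6313 | graph/path.py | evaluate_path
-- ===== SOURCE A (Python) =====
-- def evaluate_path(edges):
--     total_time = 0
--     total_cost = 0
--     transfer_count = 0
--     score_sum = 0
--
--     prev_service = None
--
--     for e in edges:
--         total_time += e.get("base_time", 0)
--         total_cost += e.get("base_cost", 0)
--         score_sum += e.get("score", 0)
--
--         if prev_service is not None and e["service"] != prev_service:
--             transfer_count += 1
--
--         prev_service = e["service"]
--
--     return {
--         "total_time": total_time,
--         "total_cost": total_cost,
--         "transfers": transfer_count,
--         "raw_score": score_sum,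
--     }
-- ===== SOURCE B (Python) =====
-- def _summarize(es):
--     # divide-and-conquer summary: (time, cost, score, transfers, first_service, last_service)
--     if len(es) == 1:
--         e = es[0]
--         sv = e["service"]
--         return (e.get("base_time", 0), e.get("base_cost", 0), e.get("score", 0), 0, sv, sv)
--     mid = len(es) // 2
--     t1, c1, s1, tr1, f1, l1 = _summarize(es[:mid])
--     t2, c2, s2, tr2, f2, l2 = _summarize(es[mid:])
--     return (t1 + t2, c1 + c2, s1 + s2, tr1 + tr2 + (1 if l1 != f2 else 0), f1, l2)
--
--
-- def evaluate_path(edges):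
--     es = list(edges)
--     if not es:
--         return {"total_time": 0, "total_cost": 0, "transfers": 0, "raw_score": 0}
--     t, c, s, tr, _, _ = _summarize(es)
--     return {"total_time": t, "total_cost": c, "transfers": tr, "raw_score": s}
-- ===== Notes on version B (the rewrite author's own statement) =====
-- stated objective: alternative
-- what changed: Replaces A's single sequential sentinel loop by a divide-and-conquer recursion that summarizes each half as (sums, transfers, first_service, last_service) and merges two summaries, counting a transfer at the seam when the left half's last service differs from the right half's first.
import Mathlib
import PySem

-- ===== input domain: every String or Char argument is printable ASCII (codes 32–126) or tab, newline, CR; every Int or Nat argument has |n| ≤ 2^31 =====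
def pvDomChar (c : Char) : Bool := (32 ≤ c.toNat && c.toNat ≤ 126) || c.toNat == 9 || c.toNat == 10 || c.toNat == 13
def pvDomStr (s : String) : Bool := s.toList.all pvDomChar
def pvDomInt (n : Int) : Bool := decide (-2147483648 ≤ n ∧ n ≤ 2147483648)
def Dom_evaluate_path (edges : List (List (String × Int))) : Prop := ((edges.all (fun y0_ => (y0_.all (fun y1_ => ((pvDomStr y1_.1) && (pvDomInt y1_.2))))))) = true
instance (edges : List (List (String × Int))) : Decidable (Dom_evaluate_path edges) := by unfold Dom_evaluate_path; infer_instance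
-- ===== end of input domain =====

-- B replaces A's single sequential sentinel loop by a divide-and-conquer recursion merging
-- half-summaries (sums, transfers, first/last service); objective: alternative, same cost.

-- shared dict primitives on the association-list encoding (lookup = first match, like dict.get)
def pvGetD (e : List (String × Int)) (k : String) (d : Int) : Int :=
  match e.find? (fun p => p.1 == k) with
  | some p => p.2
  | none => d

-- e["service"] as an Option (none = KeyError; Pre_ excludes that)
def pvSvc (e : List (String × Int)) : Option Int :=
  (e.find? (fun p => p.1 == "service")).map (·.2)

-- ===== PORT A =====
def evaluate_path (edges : List (List (String × Int))) : List (String × Int) :=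
  let st := edges.foldl
    (fun (st : Int × Int × Int × Int × Option Int) e =>
      let tt := st.1 + pvGetD e "base_time" 0
      let tc := st.2.1 + pvGetD e "base_cost" 0
      let ss := st.2.2.2.1 + pvGetD e "score" 0
      let cur := pvSvc e
      let trf := st.2.2.1 +
        (if st.2.2.2.2 ≠ none ∧ cur ≠ st.2.2.2.2 then 1 else 0)
      (tt, tc, trf, ss, cur))
    (0, 0, 0, 0, none)
  [("total_time", st.1), ("total_cost", st.2.1),
   ("transfers", st.2.2.1), ("raw_score", st.2.2.2.1)]

-- ===== PORT B =====
-- summary tuple: (time, cost, score, transfers, first_service, last_service)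
-- Python's _summarize is never called on []; the [] branch here is unreachable junk.
-- es[:mid]/es[mid:] with 0 ≤ mid ≤ len are exactly List.take/List.drop.
def pvSummarize : List (List (String × Int)) →
    Int × Int × Int × Int × Option Int × Option Int
  | [] => (0, 0, 0, 0, none, none)
  | [e] => (pvGetD e "base_time" 0, pvGetD e "base_cost" 0, pvGetD e "score" 0, 0,
            pvSvc e, pvSvc e)
  | e1 :: e2 :: rest =>
      let l := e1 :: e2 :: rest
      let mid := l.length / 2
      let x := pvSummarize (l.take mid)
      let y := pvSummarize (l.drop mid)
      (x.1 + y.1, x.2.1 + y.2.1, x.2.2.1 + y.2.2.1,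
       x.2.2.2.1 + y.2.2.2.1 + (if x.2.2.2.2.2 ≠ y.2.2.2.2.1 then 1 else 0),
       x.2.2.2.2.1, y.2.2.2.2.2)
termination_by es => es.length
decreasing_by
  · simp [List.length_take]; omega
  · simp [List.length_drop]; omega

def evaluate_path_alt (edges : List (List (String × Int))) : List (String × Int) :=
  match edges with
  | [] => [("total_time", 0), ("total_cost", 0), ("transfers", 0), ("raw_score", 0)]
  | _ =>
      let s := pvSummarize edges
      [("total_time", s.1), ("total_cost", s.2.1),
       ("transfers", s.2.2.2.1), ("raw_score", s.2.2.1)]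

-- ===== PRECONDITION & SPEC =====
-- A (and B) raise KeyError when an edge lacks the "service" key; Pre_ excludes exactly those inputs.
def Pre_evaluate_path (edges : List (List (String × Int))) : Prop :=
  (edges.all (fun e => e.any (fun p => p.1 == "service"))) = true
instance (edges : List (List (String × Int))) : Decidable (Pre_evaluate_path edges) := by
  unfold Pre_evaluate_path; infer_instance

def pvWitness_evaluate_path : (List (List (String × Int))) :=
  [[("service", 1), ("base_time", 3)], [("service", 2)]]

def Spec_evaluate_path (edges : List (List (String × Int))) (out : List (String × Int)) : Prop := out = evaluate_path_alt edges
instance (edges : List (List (String × Int))) (out : List (String × Int)) : Decidable (Spec_evaluate_path edges out) := by unfold Spec_evaluate_path; infer_instance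

-- ===== CLAIM (what is proved, stated in full; the proofs are below) =====
def Claim_equal_evaluate_path : Prop := ∀ (edges : List (List (String × Int))), Dom_evaluate_path edges → Pre_evaluate_path edges → Spec_evaluate_path edges (evaluate_path edges)

-- ===== LEMMAS AND PROOFS =====

-- recursive reading of A's transfer count, starting from a given prev_service
def trZ (prev : Option Int) : List (List (String × Int)) → Int
  | [] => 0
  | e :: es =>
      (if prev ≠ none ∧ pvSvc e ≠ prev then 1 else 0) + trZ (pvSvc e) es

lemma foldl_char (edges : List (List (String × Int)))
    (t c tr s : Int) (prev : Option Int) :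
    edges.foldl
      (fun (st : Int × Int × Int × Int × Option Int) e =>
        let tt := st.1 + pvGetD e "base_time" 0
        let tc := st.2.1 + pvGetD e "base_cost" 0
        let ss := st.2.2.2.1 + pvGetD e "score" 0
        let cur := pvSvc e
        let trf := st.2.2.1 +
          (if st.2.2.2.2 ≠ none ∧ cur ≠ st.2.2.2.2 then 1 else 0)
        (tt, tc, trf, ss, cur))
      (t, c, tr, s, prev)
    = (t + (edges.map (fun e => pvGetD e "base_time" 0)).sum,
       c + (edges.map (fun e => pvGetD e "base_cost" 0)).sum,
       tr + trZ prev edges,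
       s + (edges.map (fun e => pvGetD e "score" 0)).sum,
       (edges.map pvSvc).getLastD prev) := by
  induction edges generalizing t c tr s prev with
  | nil => simp [trZ]
  | cons e es ih =>
      simp only [List.foldl_cons, ih, List.map_cons, List.sum_cons, trZ,
        List.getLastD_cons]
      refine Prod.ext (by ring) (Prod.ext (by ring) (Prod.ext (by ring)
        (Prod.ext (by ring) rfl)))

-- splitting A's transfer count at an arbitrary point
lemma trZ_append (as ys : List (List (String × Int))) (prev : Option Int) :
    trZ prev (as ++ ys) = trZ prev as + trZ ((as.map pvSvc).getLastD prev) ys := by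
  induction as generalizing prev with
  | nil => simp [trZ]
  | cons a as ih =>
      simp only [List.cons_append, trZ, ih (pvSvc a), List.map_cons, List.getLastD_cons]
      ring

-- getLastD of an append with nonempty right part ignores the left part and the default
lemma getLastD_append_cons {α : Type} (xs : List α) (y : α) (ys : List α) (d : α) :
    (xs ++ y :: ys).getLastD d = ys.getLastD y := by
  induction xs generalizing d with
  | nil => rw [List.nil_append, List.getLastD_cons]
  | cons x xs ih => simp only [List.cons_append, List.getLastD_cons, ih]

-- the last service of a nonempty list with all services present is some value
lemma lastSvc_isSome (xs : List (List (String × Int))) (hx : xs ≠ [])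
    (h : ∀ e ∈ xs, (pvSvc e).isSome) (d : Option Int) :
    ((xs.map pvSvc).getLastD d).isSome := by
  induction xs generalizing d with
  | nil => simp at hx
  | cons a as ih =>
      simp only [List.map_cons, List.getLastD_cons]
      cases as with
      | nil => simpa using h a (by simp)
      | cons b bs =>
          exact ih (by simp) (fun e he => h e (by simp [List.mem_cons] at he ⊢; tauto))
            (pvSvc a)

-- characterization of B's divide-and-conquer summary on nonempty lists
lemma pvSummarize_char (n : ℕ) : ∀ (xs : List (List (String × Int))), xs.length = n →
    xs ≠ [] → (∀ e ∈ xs, (pvSvc e).isSome) →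
    pvSummarize xs =
      ((xs.map (fun e => pvGetD e "base_time" 0)).sum,
       (xs.map (fun e => pvGetD e "base_cost" 0)).sum,
       (xs.map (fun e => pvGetD e "score" 0)).sum,
       trZ none xs,
       (xs.map pvSvc).headD none,
       (xs.map pvSvc).getLastD none) := by
  induction n using Nat.strong_induction_on with
  | _ n ih =>
    intro xs hn hne hsome
    match xs, hn with
    | [e], hn => simp [pvSummarize, trZ]
    | e1 :: e2 :: rest, hn =>
      rw [pvSummarize]
      set l := e1 :: e2 :: rest with hl
      have hlen : 2 ≤ l.length := by simp [hl]
      set mid := l.length / 2 with hmid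
      have hmid1 : 1 ≤ mid := by omega
      have hmidlt : mid < l.length := by omega
      have htd : l.take mid ++ l.drop mid = l := List.take_append_drop mid l
      have hlt : (l.take mid).length = mid := by simp; omega
      have hld : (l.drop mid).length = l.length - mid := by simp
      have htne : l.take mid ≠ [] := by
        intro h; rw [h] at hlt; simp at hlt; omega
      have hdne : l.drop mid ≠ [] := by
        intro h; rw [h] at hld; simp at hld; omega
      have hsomeT : ∀ e ∈ l.take mid, (pvSvc e).isSome :=
        fun e he => hsome e (List.mem_of_mem_take he)
      have hsomeD : ∀ e ∈ l.drop mid, (pvSvc e).isSome :=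
        fun e he => hsome e (List.mem_of_mem_drop he)
      have iht := ih mid (by omega) (l.take mid) hlt htne hsomeT
      have ihd := ih (l.length - mid) (by omega) (l.drop mid) hld hdne hsomeD
      rw [iht, ihd]
      obtain ⟨a, as, ha⟩ := List.exists_cons_of_ne_nil htne
      obtain ⟨b, bs, hb⟩ := List.exists_cons_of_ne_nil hdne
      -- sums split along take ++ drop
      have hsum : ∀ f : List (String × Int) → Int,
          (l.map f).sum = ((l.take mid).map f).sum + ((l.drop mid).map f).sum := by
        intro f; conv_lhs => rw [← htd]
        simp
      -- last service of the left half is some value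
      obtain ⟨v, hv⟩ := Option.isSome_iff_exists.mp (lastSvc_isSome _ htne hsomeT none)
      -- transfers split: the seam comparison
      have htr : trZ none l = trZ none (l.take mid) + trZ none (l.drop mid) +
          (if ((l.take mid).map pvSvc).getLastD none ≠ ((l.drop mid).map pvSvc).headD none
           then 1 else 0) := by
        conv_lhs => rw [← htd]
        rw [trZ_append, hv, hb]
        simp only [trZ, List.map_cons, List.headD_cons]
        by_cases hveq : pvSvc b = some v
        · simp [hveq]
        · have h1 : (some v ≠ none ∧ pvSvc b ≠ some v) := ⟨by simp, hveq⟩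
          have h2 : ¬((none : Option Int) ≠ none ∧ pvSvc b ≠ none) := by simp
          have h3 : some v ≠ pvSvc b := fun h => hveq h.symm
          rw [if_pos h1, if_neg h2, if_pos h3]
          ring
      rw [hsum (fun e => pvGetD e "base_time" 0), hsum (fun e => pvGetD e "base_cost" 0),
        hsum (fun e => pvGetD e "score" 0), htr]
      -- first/last of the whole list come from the respective halves
      have hhead : (l.map pvSvc).headD none = (((l.take mid).map pvSvc)).headD none := by
        conv_lhs => rw [← htd]
        rw [ha]; simp
      have hlast : (l.map pvSvc).getLastD none = (((l.drop mid).map pvSvc)).getLastD none := by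
        conv_lhs => rw [← htd]
        rw [hb, List.map_append, List.map_cons, getLastD_append_cons]
        rw [List.getLastD_cons]
      rw [hhead, hlast]

-- ===== VERDICT (by name: the statement is the Claim_ definition above) =====
theorem evaluate_path_spec : Claim_equal_evaluate_path := by
  intro edges _ hpre
  unfold Spec_evaluate_path
  have hall : ∀ e ∈ edges, (pvSvc e).isSome := by
    intro e he
    have := (List.all_eq_true.mp hpre) e he
    rcases List.any_eq_true.mp this with ⟨p, hp, hk⟩
    simp only [pvSvc, Option.isSome_map]
    exact List.find?_isSome.mpr ⟨p, hp, hk⟩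
  cases edges with
  | nil => rfl
  | cons e es =>
      unfold evaluate_path evaluate_path_alt
      rw [foldl_char, pvSummarize_char (e :: es).length (e :: es) rfl (by simp) hall]
      simp
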